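-- pv_equiv track=rewrite | github.com/wan-catherine/Leetcode | problems/N1513_Number_Of_Substrings_With_Only_1S.py | numSub_two_pointers
-- ===== SOURCE A (Python) =====
-- def numSub_two_pointers(s):
--     """
--     :type s: str
--     :rtype: int
--     """
--     s += '0'
--     length = len(s)
--     start, end = -1, 0
--     res = 0
--     while end < length:
--         if s[end] == "1":
--             res += end - start
--         else:
--             start = end
--         end += 1
--     return res % (10 ** 9 + 7)
-- ===== SOURCE B (Python) =====
-- def numSub_two_pointers(s):
--     """
--     :type s: str
--     :rtype: int
--     """
--     total = 0
--     run = 0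
--     for c in s:
--         if c == '1':
--             run += 1
--         else:
--             total += run * (run + 1) // 2
--             run = 0
--     total += run * (run + 1) // 2
--     return total % (10 ** 9 + 7)
-- ===== Notes on version B (the rewrite author's own statement) =====
-- stated objective: simpler
-- what changed: Replaces A's sentinel-append and two-pointer per-character offset accumulation with a run-length scan that adds the closed-form k*(k+1)//2 for each maximal run of 1s.
import Mathlib
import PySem

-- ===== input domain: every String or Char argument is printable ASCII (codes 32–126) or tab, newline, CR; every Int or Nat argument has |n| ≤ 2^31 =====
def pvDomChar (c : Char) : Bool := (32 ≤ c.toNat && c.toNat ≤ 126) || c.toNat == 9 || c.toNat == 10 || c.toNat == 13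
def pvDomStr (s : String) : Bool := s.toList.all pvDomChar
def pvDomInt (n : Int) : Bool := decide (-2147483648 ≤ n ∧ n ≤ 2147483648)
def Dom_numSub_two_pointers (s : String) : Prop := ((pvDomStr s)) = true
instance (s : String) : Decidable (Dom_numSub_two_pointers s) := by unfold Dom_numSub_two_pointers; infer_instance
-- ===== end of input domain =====

-- B replaces A's sentinel-append two-pointer scan by a run-length scan adding k*(k+1)//2 per maximal run of 1s (objective: simpler).

-- ===== PORT A =====
-- while end < length over s + '0': end walks the characters left to right, carrying (start, res)
def pvLoopA : List Char → Int → Int → Int → Int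
  | [], _, _, res => res
  | c :: rest, e, start, res =>
    if c = '1' then pvLoopA rest (e + 1) start (res + (e - start))
    else pvLoopA rest (e + 1) e res

def numSub_two_pointers (s : String) : Int :=
  PySem.Int.mod (pvLoopA (s.toList ++ ['0']) 0 (-1) 0) (10 ^ 9 + 7)

-- ===== PORT B =====
-- for c in s, carrying (run, total); final run closed after the loop
def pvLoopB : List Char → Int → Int → Int
  | [], run, total => total + PySem.Int.floordiv (run * (run + 1)) 2
  | c :: rest, run, total =>
    if c = '1' then pvLoopB rest (run + 1) total
    else pvLoopB rest 0 (total + PySem.Int.floordiv (run * (run + 1)) 2)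

def numSub_two_pointers_alt (s : String) : Int :=
  PySem.Int.mod (pvLoopB s.toList 0 0) (10 ^ 9 + 7)

-- ===== PRECONDITION & SPEC =====
def Spec_numSub_two_pointers (s : String) (out : Int) : Prop := out = numSub_two_pointers_alt s
instance (s : String) (out : Int) : Decidable (Spec_numSub_two_pointers s out) := by unfold Spec_numSub_two_pointers; infer_instance

-- ===== CLAIM (what is proved, stated in full; the proofs are below) =====
def Claim_equal_numSub_two_pointers : Prop := ∀ (s : String), Dom_numSub_two_pointers s → Spec_numSub_two_pointers s (numSub_two_pointers s)

-- ===== LEMMAS AND PROOFS =====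

lemma pv_tri_step (run : Int) :
    PySem.Int.floordiv (run * (run + 1)) 2 + (run + 1)
      = PySem.Int.floordiv ((run + 1) * (run + 1 + 1)) 2 := by
  obtain ⟨k, hk⟩ := Int.even_mul_succ_self run
  have h1 : run * (run + 1) = 2 * k := by omega
  have h2 : (run + 1) * (run + 1 + 1) = 2 * (k + run + 1) := by nlinarith [hk]
  rw [h1, h2, PySem.Int.floordiv_eq_ediv_of_pos (by norm_num),
      PySem.Int.floordiv_eq_ediv_of_pos (by norm_num),
      Int.mul_ediv_cancel_left _ (by norm_num), Int.mul_ediv_cancel_left _ (by norm_num)]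
  ring

lemma pv_loop_eq : ∀ (cs : List Char) (e run total : Int),
    pvLoopA (cs ++ ['0']) e (e - run - 1) (total + PySem.Int.floordiv (run * (run + 1)) 2)
      = pvLoopB cs run total := by
  intro cs
  induction cs with
  | nil =>
    intro e run total
    simp [pvLoopA, pvLoopB]
  | cons c cs ih =>
    intro e run total
    by_cases h : c = '1'
    · subst h
      simp only [List.cons_append, pvLoopA, pvLoopB]
      have he : e - (e - run - 1) = run + 1 := by ring
      rw [he]
      have := ih (e + 1) (run + 1) total
      have hs : (e + 1) - (run + 1) - 1 = e - run - 1 := by ring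
      rw [hs] at this
      rw [show total + PySem.Int.floordiv (run * (run + 1)) 2 + (run + 1)
            = total + PySem.Int.floordiv ((run + 1) * (run + 1 + 1)) 2 from by
          rw [add_assoc, pv_tri_step]]
      exact this
    · simp only [List.cons_append, pvLoopA, pvLoopB, if_neg h]
      have := ih (e + 1) 0 (total + PySem.Int.floordiv (run * (run + 1)) 2)
      have hs : (e + 1) - 0 - 1 = e := by ring
      rw [hs] at this
      simpa using this

-- ===== VERDICT (by name: the statement is the Claim_ definition above) =====
theorem numSub_two_pointers_spec : Claim_equal_numSub_two_pointers := by
  intro s _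
  unfold Spec_numSub_two_pointers numSub_two_pointers numSub_two_pointers_alt
  have := pv_loop_eq s.toList 0 0 0
  simp only [show (0 : Int) - 0 - 1 = -1 by ring] at this
  rw [← this]
  norm_num [PySem.Int.floordiv]
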